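-- pv_equiv track=rewrite | github.com/mpelos/virtual-agora | src/virtual_agora/agenda/voting.py | _extract_mentioned_topics
-- ===== SOURCE A (Python) =====
-- from typing import Dict, List, Optional, Any, Tuple
--
-- def _extract_mentioned_topics(
--     vote_content: str, available_topics: List[str]
-- ) -> List[str]:
--     """Extract topics in order of mention.
--
--     Args:
--         vote_content: Vote text
--         available_topics: Available topics
--
--     Returns:
--         List of topics in order mentioned
--     """
--     mentioned = []
--     vote_lower = vote_content.lower()
--
--     # Find topics in order of appearance
--     topic_positions = []
--     for topic in available_topics:
--         pos = vote_lower.find(topic.lower())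
--         if pos != -1:
--             topic_positions.append((pos, topic))
--
--     # Sort by position and return topics
--     topic_positions.sort(key=lambda x: x[0])
--     return [topic for pos, topic in topic_positions]
-- ===== SOURCE B (Python) =====
-- def _extract_mentioned_topics(vote_content, available_topics):
--     """Bucket the topics by first-occurrence position and flatten the buckets
--     in position order: no (pos, topic) pair list and no comparison sort."""
--     text = vote_content.lower()
--     buckets = [[] for _ in range(len(text) + 1)]
--     for topic in available_topics:
--         pos = text.find(topic.lower())
--         if pos != -1:
--             buckets[pos].append(topic)
--     return [topic for bucket in buckets for topic in bucket]
-- ===== Notes on version B (the rewrite author's own statement) =====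
-- stated objective: alternative
-- what changed: Replaces A's (position, topic) pair list plus comparison sort by a bucket pass: topics are scattered into a position-indexed bucket table by their first occurrence and the table is flattened in position order, so no pair list and no sort exist.
import Mathlib
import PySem

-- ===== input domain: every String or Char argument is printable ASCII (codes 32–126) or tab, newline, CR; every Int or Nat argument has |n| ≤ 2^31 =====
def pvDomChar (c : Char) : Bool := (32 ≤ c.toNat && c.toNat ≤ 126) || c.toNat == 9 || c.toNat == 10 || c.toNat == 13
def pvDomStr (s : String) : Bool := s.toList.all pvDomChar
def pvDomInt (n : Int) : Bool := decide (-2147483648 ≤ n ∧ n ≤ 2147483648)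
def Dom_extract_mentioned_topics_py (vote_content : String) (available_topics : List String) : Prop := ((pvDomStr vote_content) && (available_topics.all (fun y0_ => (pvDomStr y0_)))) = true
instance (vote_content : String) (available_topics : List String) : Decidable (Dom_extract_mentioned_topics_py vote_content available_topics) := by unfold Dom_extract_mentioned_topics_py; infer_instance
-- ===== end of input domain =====

-- B buckets each topic by the first-occurrence position of its lowercased form and flattens
-- the buckets in position order (a counting/bucket pass instead of A's pair list + stable sort).

-- ===== PORT A =====
def extract_mentioned_topics_py (vote_content : String) (available_topics : List String) : List String :=
  let vote_lower := PySem.Str.lower vote_content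
  let topic_positions : List (Int × String) :=
    available_topics.foldl
      (fun acc topic =>
        if PySem.Str.find vote_lower (PySem.Str.lower topic) ≠ -1 then
          acc ++ [(PySem.Str.find vote_lower (PySem.Str.lower topic), topic)]
        else acc)
      []
  (PySem.List.sorted topic_positions (fun x => x.1) false).map (fun x => x.2)

-- ===== PORT B =====
def extract_mentioned_topics_py_alt (vote_content : String) (available_topics : List String) : List String :=
  let text := (PySem.Str.lower vote_content).toList
  -- buckets = [[] for _ in range(len(text) + 1)]; buckets[pos].append(topic)
  -- (pos is always in range here since 0 <= pos <= len(text), so the getD [] default is never used)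
  let buckets : List (List String) :=
    available_topics.foldl
      (fun bs topic =>
        if PySem.Chars.find text (PySem.Str.lower topic).toList ≠ -1 then
          bs.set (PySem.Chars.find text (PySem.Str.lower topic).toList).toNat
            ((bs[(PySem.Chars.find text (PySem.Str.lower topic).toList).toNat]?).getD []
              ++ [topic])
        else bs)
      (List.replicate (text.length + 1) [])
  buckets.flatten

-- ===== PRECONDITION & SPEC =====
def Spec_extract_mentioned_topics_py (vote_content : String) (available_topics : List String) (out : List String) : Prop := out = extract_mentioned_topics_py_alt vote_content available_topics
instance (vote_content : String) (available_topics : List String) (out : List String) : Decidable (Spec_extract_mentioned_topics_py vote_content available_topics out) := by unfold Spec_extract_mentioned_topics_py; infer_instance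

-- ===== CLAIM (what is proved, stated in full; the proofs are below) =====
def Claim_equal_extract_mentioned_topics_py : Prop := ∀ (vote_content : String) (available_topics : List String), Dom_extract_mentioned_topics_py vote_content available_topics → Spec_extract_mentioned_topics_py vote_content available_topics (extract_mentioned_topics_py vote_content available_topics)

-- ===== LEMMAS AND PROOFS =====
-- insertion into a key-split list
lemma pv_insertBy_middle {α : Type} (before : α → α → Bool) (x : α) :
    ∀ (l1 l2 : List α), (∀ a ∈ l1, before x a = false) → (∀ a ∈ l2, before x a = true) →
      PySem.List.insertBy before x (l1 ++ l2) = l1 ++ x :: l2 := by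
  intro l1
  induction l1 with
  | nil =>
    intro l2 _ h2
    cases l2 with
    | nil => simp [PySem.List.insertBy]
    | cons b t => simp [PySem.List.insertBy, h2 b (by simp)]
  | cons a t ih =>
    intro l2 h1 h2
    simp [PySem.List.insertBy, h1 a (by simp), ih l2 (fun y hy => h1 y (by simp [hy])) h2]

-- stable sort on Int keys in [0, n) = concatenation of the key fibers in key order
lemma pv_sorted_fibers {α : Type} (n : Nat) :
    ∀ (ps : List (Int × α)), (∀ p ∈ ps, 0 ≤ p.1 ∧ p.1 < (n : Int)) →
      PySem.List.sorted ps (fun p => p.1) false =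
        (List.range n).flatMap (fun (i : Nat) => ps.filter (fun p => decide (p.1 = (i : Int)))) := by
  intro ps
  induction ps using List.reverseRecOn with
  | nil => intro _; simp [PySem.List.sorted_eq_foldl_insertBy]
  | append_singleton ps x ih =>
    intro h
    have hx := h x (by simp)
    have hps : ∀ p ∈ ps, 0 ≤ p.1 ∧ p.1 < (n : Int) := fun p hp => h p (by simp [hp])
    have hstep : PySem.List.sorted (ps ++ [x]) (fun p => p.1) false =
        PySem.List.insertBy (fun a b => decide (a.1 < b.1)) x
          (PySem.List.sorted ps (fun p => p.1) false) := by
      rw [PySem.List.sorted_eq_foldl_insertBy, PySem.List.sorted_eq_foldl_insertBy,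
        List.foldl_append]
      rfl
    set v : Nat := x.1.toNat with hv
    have hxv : x.1 = (v : Int) := by omega
    have hvn : v < n := by omega
    -- split range n at v
    have hsplit : List.range n = List.range v ++ [v] ++ ((List.range (n - (v+1))).map (fun j => (v+1) + j)) := by
      conv_lhs => rw [show n = (v + 1) + (n - (v + 1)) by omega]
      rw [List.range_add, List.range_succ]
    have fib_eq : ∀ i : Nat,
        ((ps ++ [x]).filter (fun p => decide (p.1 = (i : Int)))) =
          ps.filter (fun p => decide (p.1 = (i : Int))) ++ (if x.1 = (i : Int) then [x] else []) := by
      intro i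
      rw [List.filter_append]
      congr 1
      by_cases hxe : x.1 = (i : Int) <;> simp [hxe]
    rw [hstep, ih hps, hsplit]
    rw [List.flatMap_append, List.flatMap_append, List.flatMap_append, List.flatMap_append]
    have h1 : (List.range v).flatMap (fun (i : Nat) => (ps ++ [x]).filter (fun p => decide (p.1 = (i : Int)))) =
        (List.range v).flatMap (fun (i : Nat) => ps.filter (fun p => decide (p.1 = (i : Int)))) := by
      apply List.flatMap_congr
      intro i hi
      rw [fib_eq i]
      have : x.1 ≠ (i : Int) := by
        have := List.mem_range.mp hi; omega
      simp [this]
    have h2 : ((List.range (n - (v+1))).map (fun j => (v+1) + j)).flatMap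
          (fun (i : Nat) => (ps ++ [x]).filter (fun p => decide (p.1 = (i : Int)))) =
        ((List.range (n - (v+1))).map (fun j => (v+1) + j)).flatMap
          (fun (i : Nat) => ps.filter (fun p => decide (p.1 = (i : Int)))) := by
      apply List.flatMap_congr
      intro i hi
      rw [fib_eq i]
      have : x.1 ≠ (i : Int) := by
        rcases List.mem_map.mp hi with ⟨j, _, rfl⟩
        push_cast; omega
      simp [this]
    have h3 : [v].flatMap (fun (i : Nat) => (ps ++ [x]).filter (fun p => decide (p.1 = (i : Int)))) =
        [v].flatMap (fun (i : Nat) => ps.filter (fun p => decide (p.1 = (i : Int)))) ++ [x] := by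
      simp [hxv]
    rw [h1, h2, h3]
    -- now insert x into F1 ++ Fv ++ F2
    have := pv_insertBy_middle (fun a b : Int × α => decide (a.1 < b.1)) x
      ((List.range v).flatMap (fun (i : Nat) => ps.filter (fun p => decide (p.1 = (i : Int)))) ++
        [v].flatMap (fun (i : Nat) => ps.filter (fun p => decide (p.1 = (i : Int)))))
      (((List.range (n - (v+1))).map (fun j => (v+1) + j)).flatMap
        (fun (i : Nat) => ps.filter (fun p => decide (p.1 = (i : Int)))))
      (by
        intro a ha
        simp only [List.mem_append, List.mem_flatMap, List.mem_filter] at ha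
        have : a.1 ≤ (v : Int) := by
          rcases ha with ⟨i, hi, _, he⟩ | ⟨i, hi, _, he⟩
          · have := List.mem_range.mp hi
            have he' := of_decide_eq_true he
            omega
          · simp at hi
            have he' := of_decide_eq_true he
            omega
        simp [hxv]; omega)
      (by
        intro a ha
        simp only [List.mem_flatMap, List.mem_filter] at ha
        rcases ha with ⟨i, hi, _, he⟩
        rcases List.mem_map.mp hi with ⟨j, _, rfl⟩
        have he' := of_decide_eq_true he
        simp [hxv]; push_cast at he' ⊢; omega)
    rw [this]
    simp

-- B's bucket loop builds exactly the position fibers over [0, len]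
lemma pv_buckets_eq (text : List Char) :
    ∀ (ts : List String),
      ts.foldl
        (fun bs topic =>
          if PySem.Chars.find text (PySem.Str.lower topic).toList ≠ -1 then
            bs.set (PySem.Chars.find text (PySem.Str.lower topic).toList).toNat
              ((bs[(PySem.Chars.find text (PySem.Str.lower topic).toList).toNat]?).getD []
                ++ [topic])
          else bs)
        (List.replicate (text.length + 1) []) =
      (List.range (text.length + 1)).map
        (fun (i : Nat) => ts.filter (fun t =>
          decide (PySem.Chars.find text (PySem.Str.lower t).toList = (i : Int)))) := by
  intro ts
  induction ts using List.reverseRecOn with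
  | nil => simp only [List.foldl_nil, List.filter_nil, List.map_const', List.length_range]
  | append_singleton ts t ih =>
    rw [List.foldl_append, List.foldl_cons, List.foldl_nil, ih]
    have fib_eq : ∀ i : Nat,
        (ts ++ [t]).filter (fun t' =>
            decide (PySem.Chars.find text (PySem.Str.lower t').toList = (i : Int))) =
          ts.filter (fun t' =>
            decide (PySem.Chars.find text (PySem.Str.lower t').toList = (i : Int))) ++
          (if PySem.Chars.find text (PySem.Str.lower t).toList = (i : Int) then [t] else []) := by
      intro i
      rw [List.filter_append]
      congr 1
      rw [List.filter_singleton]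
      by_cases he : PySem.Chars.find text (PySem.Str.lower t).toList = (i : Int)
      · rw [decide_eq_true he, cond_true, if_pos he]
      · rw [decide_eq_false he, cond_false, if_neg he]
    by_cases hne : PySem.Chars.find text (PySem.Str.lower t).toList ≠ -1
    · rw [if_pos hne]
      have hge := PySem.Chars.neg_one_le_find text (PySem.Str.lower t).toList
      have hle := PySem.Chars.find_le_length text (PySem.Str.lower t).toList
      set v : Nat := (PySem.Chars.find text (PySem.Str.lower t).toList).toNat with hv
      have hfv : PySem.Chars.find text (PySem.Str.lower t).toList = (v : Int) := by omega
      have hvn : v < text.length + 1 := by omega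
      have hget : (((List.range (text.length + 1)).map
          (fun (i : Nat) => ts.filter (fun t' =>
            decide (PySem.Chars.find text (PySem.Str.lower t').toList = (i : Int)))))[v]?).getD [] =
          ts.filter (fun t' =>
            decide (PySem.Chars.find text (PySem.Str.lower t').toList = (v : Int))) := by
        rw [List.getElem?_map, List.getElem?_range hvn]
        rfl
      rw [hget]
      apply List.ext_getElem
      · simp
      · intro j h1 h2
        simp only [List.length_set, List.length_map, List.length_range] at h1 h2
        rw [List.getElem_set]
        simp only [List.getElem_map, List.getElem_range]
        rw [fib_eq j]
        by_cases hj : v = j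
        · rw [if_pos hj, if_pos (by omega : PySem.Chars.find text (PySem.Str.lower t).toList = (j : Int))]
          subst hj; rfl
        · rw [if_neg hj, if_neg (by omega : ¬ PySem.Chars.find text (PySem.Str.lower t).toList = (j : Int))]
          simp only [List.append_nil]
    · rw [if_neg hne]
      apply List.map_congr_left
      intro i hi
      rw [fib_eq i]
      have : ¬ PySem.Chars.find text (PySem.Str.lower t).toList = (i : Int) := by
        have hge := PySem.Chars.neg_one_le_find text (PySem.Str.lower t).toList
        omega
      rw [if_neg this, List.append_nil]

-- ===== VERDICT (by name: the statement is the Claim_ definition above) =====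
set_option maxHeartbeats 1000000 in
theorem extract_mentioned_topics_py_spec : Claim_equal_extract_mentioned_topics_py := by
  intro vote_content available_topics _
  unfold Spec_extract_mentioned_topics_py
  unfold extract_mentioned_topics_py extract_mentioned_topics_py_alt
  simp only [PySem.Str.find_eq]
  set text := (PySem.Str.lower vote_content).toList with htext
  -- rewrite A's accumulation loop into filter + map
  rw [PySem.List.foldl_append_ite
    (p := fun topic => PySem.Chars.find text (PySem.Str.lower topic).toList ≠ -1)
    (f := fun topic => (PySem.Chars.find text (PySem.Str.lower topic).toList, topic))]
  rw [List.nil_append]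
  -- rewrite A's sort into key fibers over [0, len+1)
  rw [pv_sorted_fibers (text.length + 1)
    ((available_topics.filter
        (fun x => decide (PySem.Chars.find text (PySem.Str.lower x).toList ≠ -1))).map
      (fun topic => (PySem.Chars.find text (PySem.Str.lower topic).toList, topic)))
    (by
      intro p hp
      simp only [List.mem_map, List.mem_filter] at hp
      rcases hp with ⟨t, ⟨_, hne⟩, rfl⟩
      have hne' := of_decide_eq_true hne
      have h1 := PySem.Chars.neg_one_le_find text (PySem.Str.lower t).toList
      have h2 := PySem.Chars.find_le_length text (PySem.Str.lower t).toList
      constructor <;> simp at * <;> omega)]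
  -- rewrite B's bucket loop and flatten it
  rw [pv_buckets_eq text available_topics, List.flatten_eq_flatMap, List.flatMap_map]
  -- both sides are flatMaps over range (len+1); match the fibers
  rw [List.map_flatMap]
  apply List.flatMap_congr
  intro i _
  rw [List.filter_map, List.map_map, List.filter_filter]
  have : ∀ t : String,
      (((fun p : Int × String => decide (p.1 = (i : Int))) ∘
        (fun t => (PySem.Chars.find text (PySem.Str.lower t).toList, t))) t &&
        decide (PySem.Chars.find text (PySem.Str.lower t).toList ≠ -1)) =
      decide (PySem.Chars.find text (PySem.Str.lower t).toList = (i : Int)) := by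
    intro t
    simp only [Function.comp]
    by_cases he : PySem.Chars.find text (PySem.Str.lower t).toList = (i : Int)
    · rw [decide_eq_true he,
        decide_eq_true (show PySem.Chars.find text (PySem.Str.lower t).toList ≠ -1 by omega),
        Bool.and_true]
    · rw [decide_eq_false he, Bool.false_and]
  rw [funext this]
  simp [Function.comp_def]
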